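-- pv_equiv track=rewrite | github.com/adecourcy/ImmuNovo | archive scripts/metrics.py | comparePeptides
-- ===== SOURCE A (Python) =====
-- def comparePeptides(originalPeptide, falsePeptide, match, noMatch):
--   originalPeptide = [x for x in originalPeptide]
--   falsePeptide = [x for x in falsePeptide]
--   originalPeptide.sort()
--   falsePeptide.sort()
--
--   if originalPeptide == falsePeptide:
--     match += 1
--   else:
--     noMatch += 1
--
--   return match, noMatch
-- ===== SOURCE B (Python) =====
-- def comparePeptides(originalPeptide, falsePeptide, match, noMatch):
--   originalCounts = {}
--   for c in originalPeptide:
--     originalCounts[c] = originalCounts.get(c, 0) + 1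
--   falseCounts = {}
--   for c in falsePeptide:
--     falseCounts[c] = falseCounts.get(c, 0) + 1
--
--   if originalCounts == falseCounts:
--     return match + 1, noMatch
--   return match, noMatch + 1
-- ===== Notes on version B (the rewrite author's own statement) =====
-- stated objective: alternative
-- what changed: B decides the anagram test by building one frequency dictionary per peptide and comparing them as maps, instead of sorting both character lists and comparing the sorted lists.
import Mathlib
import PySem

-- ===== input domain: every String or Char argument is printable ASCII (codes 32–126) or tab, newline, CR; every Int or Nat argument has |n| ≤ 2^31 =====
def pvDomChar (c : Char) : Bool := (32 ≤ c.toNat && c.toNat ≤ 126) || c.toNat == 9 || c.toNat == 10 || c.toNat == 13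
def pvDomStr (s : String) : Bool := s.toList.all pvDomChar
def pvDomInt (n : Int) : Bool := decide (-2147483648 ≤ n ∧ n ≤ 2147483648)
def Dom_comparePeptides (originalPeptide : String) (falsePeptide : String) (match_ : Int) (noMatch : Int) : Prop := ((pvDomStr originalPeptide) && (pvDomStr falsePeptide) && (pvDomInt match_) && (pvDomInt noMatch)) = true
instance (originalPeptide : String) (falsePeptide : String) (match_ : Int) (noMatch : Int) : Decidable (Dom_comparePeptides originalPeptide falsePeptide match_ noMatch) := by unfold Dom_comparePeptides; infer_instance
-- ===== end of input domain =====

-- B replaces A's sort-both-lists-and-compare with building a frequency dictionary per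
-- peptide and comparing the dictionaries as maps (objective: alternative algorithm).

-- ===== PORT A =====
def comparePeptides (originalPeptide : String) (falsePeptide : String) (match_ : Int) (noMatch : Int) : Int × Int :=
  let o := originalPeptide.toList
  let f := falsePeptide.toList
  let o := PySem.List.sorted o (fun x => x) false
  let f := PySem.List.sorted f (fun x => x) false
  if o = f then (match_ + 1, noMatch) else (match_, noMatch + 1)

-- ===== PORT B =====
-- counts[c] = counts.get(c, 0) + 1 loop
def pvCounts (s : String) : PySem.Dict Char Int :=
  s.toList.foldl (fun d c => d.insert c (d.getD c 0 + 1)) PySem.Dict.empty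

-- Python dict '==' ignores insertion order: same key set, equal values per key
def pvDictEq (d e : PySem.Dict Char Int) : Bool :=
  d.keys.all (fun k => e.contains k) && e.keys.all (fun k => d.contains k)
    && d.keys.all (fun k => d.getD k 0 == e.getD k 0)

def comparePeptides_alt (originalPeptide : String) (falsePeptide : String) (match_ : Int) (noMatch : Int) : Int × Int :=
  let co := pvCounts originalPeptide
  let cf := pvCounts falsePeptide
  if pvDictEq co cf then (match_ + 1, noMatch) else (match_, noMatch + 1)

-- ===== PRECONDITION & SPEC =====
def Spec_comparePeptides (originalPeptide : String) (falsePeptide : String) (match_ : Int) (noMatch : Int) (out : Int × Int) : Prop := out = comparePeptides_alt originalPeptide falsePeptide match_ noMatch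
instance (originalPeptide : String) (falsePeptide : String) (match_ : Int) (noMatch : Int) (out : Int × Int) : Decidable (Spec_comparePeptides originalPeptide falsePeptide match_ noMatch out) := by unfold Spec_comparePeptides; infer_instance

-- ===== CLAIM (what is proved, stated in full; the proofs are below) =====
def Claim_equal_comparePeptides : Prop := ∀ (originalPeptide : String) (falsePeptide : String) (match_ : Int) (noMatch : Int), Dom_comparePeptides originalPeptide falsePeptide match_ noMatch → Spec_comparePeptides originalPeptide falsePeptide match_ noMatch (comparePeptides originalPeptide falsePeptide match_ noMatch)

-- ===== LEMMAS AND PROOFS =====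

lemma pvCounts_eq_counter (s : String) : pvCounts s = PySem.Dict.counter s.toList :=
  PySem.Dict.foldl_insert_getD_add_one_eq_counter s.toList

lemma pvDictEq_iff_perm (o f : List Char) :
    pvDictEq (PySem.Dict.counter o) (PySem.Dict.counter f) = true ↔ o.Perm f := by
  simp only [pvDictEq, Bool.and_eq_true, List.all_eq_true,
    PySem.Dict.keys_counter, PySem.Dict.contains_counter, PySem.Dict.getD_counter,
    PySem.Set.mem_ofList, beq_iff_eq, Nat.cast_inj, List.contains_eq_mem,
    decide_eq_true_eq]
  constructor
  · rintro ⟨⟨hof, hfo⟩, hcnt⟩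
    rw [List.perm_iff_count]
    intro c
    by_cases hc : c ∈ o
    · exact hcnt c hc
    · have hcf : c ∉ f := fun h => hc (hfo c h)
      simp [List.count_eq_zero_of_not_mem hc, List.count_eq_zero_of_not_mem hcf]
  · intro hp
    refine ⟨⟨fun c hc => hp.mem_iff.mp hc, fun c hc => hp.mem_iff.mpr hc⟩, ?_⟩
    intro c _
    exact (List.perm_iff_count.mp hp) c

lemma sortEq_iff_perm (o f : List Char) :
    PySem.List.sorted o (fun x => x) false = PySem.List.sorted f (fun x => x) false ↔ o.Perm f :=
  PySem.List.sorted_id_eq_sorted_id_iff_perm o f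

-- ===== VERDICT (by name: the statement is the Claim_ definition above) =====
theorem comparePeptides_spec : Claim_equal_comparePeptides := by
  intro o f m n _
  unfold Spec_comparePeptides comparePeptides comparePeptides_alt
  rw [pvCounts_eq_counter, pvCounts_eq_counter]
  by_cases hp : o.toList.Perm f.toList
  · rw [if_pos ((sortEq_iff_perm _ _).mpr hp), if_pos ((pvDictEq_iff_perm _ _).mpr hp)]
  · rw [if_neg (fun h => hp ((sortEq_iff_perm _ _).mp h)),
        if_neg (fun h => hp ((pvDictEq_iff_perm _ _).mp h))]
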